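-- pv_equiv track=rewrite | github.com/uuzeeex/project-euler | src/p167.py | _gen_init_ulams
-- ===== SOURCE A (Python) =====
-- from typing import List
--
-- def _gen_init_ulams(n: int) -> List[int]:
--     a, b = 2, n * 2 + 1
--     ulam_set = {a, b}
--     ulam_seq = [a, b]
--     i = b + 1
--     while True:
--         cnt = 0
--         for u in reversed(ulam_seq):
--             if i - u >= u:
--                 break
--             if i - u in ulam_set:
--                 cnt += 1
--                 if cnt > 1:
--                     break
--         if cnt == 1:
--             ulam_set.add(i)
--             ulam_seq.append(i)
--             if i > 2 and i & 1 == 0: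
--                 break
--         i += 1
--     return ulam_seq
-- ===== SOURCE B (Python) =====
-- from typing import List
--
-- def _gen_init_ulams(n: int) -> List[int]:
--     a, b = 2, n * 2 + 1
--     ulam_seq = [a, b]
--     count = {a + b: 1}
--     i = b + 1
--     while True:
--         if count.get(i) == 1:
--             for s in ulam_seq:
--                 count[s + i] = count.get(s + i, 0) + 1
--             ulam_seq.append(i)
--             if i > 2 and i % 2 == 0:
--                 return ulam_seq
--         i += 1
-- ===== Notes on version B (the rewrite author's own statement) =====
-- stated objective: alternative
-- what changed: B drops A's per-candidate backward scan of the sequence (with its uniqueness-count breaks) and instead maintains a dict mapping each value to its number of distinct-pair representations, updated incrementally with the new pairwise sums each time a term is accepted, so a candidate is tested by one dict lookup.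
-- outside the precondition, e.g. on _gen_init_ulams(0): A does not finish within the time limit, B returns [2, 1, 3, 4]
import Mathlib
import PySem

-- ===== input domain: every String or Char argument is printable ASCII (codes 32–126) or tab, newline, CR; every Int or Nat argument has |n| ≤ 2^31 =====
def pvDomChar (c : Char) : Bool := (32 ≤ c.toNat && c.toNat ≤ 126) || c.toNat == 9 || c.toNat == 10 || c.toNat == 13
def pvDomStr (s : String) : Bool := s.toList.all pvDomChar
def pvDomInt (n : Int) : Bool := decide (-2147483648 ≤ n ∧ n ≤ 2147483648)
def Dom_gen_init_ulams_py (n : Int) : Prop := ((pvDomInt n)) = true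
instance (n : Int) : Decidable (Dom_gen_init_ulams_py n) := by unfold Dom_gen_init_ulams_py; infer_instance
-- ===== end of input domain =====

-- B replaces A's per-candidate backward scan of the sequence by an incrementally
-- maintained table of distinct-pair sum counts (alternative algorithm, similar cost).
-- The internal Python set/dict are used for membership/lookup only, so both ports carry
-- them as ordered containers (Std.TreeSet / Std.TreeMap) — same observable behaviour.

-- ===== PORT A =====
-- 'for u in reversed(ulam_seq)' with its two breaks; cnt is the Python accumulator
def aScan (uset : Std.TreeSet Int) (i : Int) : List Int → Int → Int
  | [], cnt => cnt
  | u :: rest, cnt =>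
    if i - u ≥ u then cnt
    else if uset.contains (i - u) then
      (if cnt + 1 > 1 then cnt + 1 else aScan uset i rest (cnt + 1))
    else aScan uset i rest cnt

-- the 'while True' loop; fuel bounds the number of candidate values of i tried
-- (a totality guard only; both ports use the same fuel and return the current seq at 0)
def aLoop : Nat → Std.TreeSet Int → List Int → Int → List Int
  | 0, _, seq, _ => seq
  | fuel + 1, uset, seq, i =>
    if aScan uset i seq.reverse 0 = 1 then
      (if 2 < i ∧ Int.land i 1 = 0 then seq ++ [i]
       else aLoop fuel (uset.insert i) (seq ++ [i]) (i + 1))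
    else aLoop fuel uset seq (i + 1)

def gen_init_ulams_py (n : Int) : List Int :=
  let a : Int := 2
  let b : Int := n * 2 + 1
  aLoop (2 * n + 8).toNat (((∅ : Std.TreeSet Int).insert a).insert b) [a, b] (b + 1)

-- ===== PORT B =====
def bLoop : Nat → Std.TreeMap Int Int → List Int → Int → List Int
  | 0, _, seq, _ => seq
  | fuel + 1, count, seq, i =>
    if count.get? i = some 1 then
      (if 2 < i ∧ PySem.Int.mod i 2 = 0 then seq ++ [i]
       else bLoop fuel
         (seq.foldl (fun d t => d.insert (t + i) (d.getD (t + i) 0 + 1)) count)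
         (seq ++ [i]) (i + 1))
    else bLoop fuel count seq (i + 1)

def gen_init_ulams_py_alt (n : Int) : List Int :=
  let a : Int := 2
  let b : Int := n * 2 + 1
  bLoop (2 * n + 8).toNat ((∅ : Std.TreeMap Int Int).insert (a + b) 1) [a, b] (b + 1)

-- ===== PRECONDITION & SPEC =====
-- For n ≤ 0 the initial pair has b = 2n+1 ≤ 1, A's inner scan always breaks at once with
-- cnt = 0, and A's while-loop never terminates; Pre_ keeps exactly the inputs where A returns.
def Pre_gen_init_ulams_py (n : Int) : Prop := 1 ≤ n
instance (n : Int) : Decidable (Pre_gen_init_ulams_py n) := by unfold Pre_gen_init_ulams_py; infer_instance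
def pvWitness_gen_init_ulams_py : Int := 1

def Spec_gen_init_ulams_py (n : Int) (out : List Int) : Prop := out = gen_init_ulams_py_alt n
instance (n : Int) (out : List Int) : Decidable (Spec_gen_init_ulams_py n out) := by unfold Spec_gen_init_ulams_py; infer_instance

-- ===== CLAIM (what is proved, stated in full; the proofs are below) =====
def Claim_equal_gen_init_ulams_py : Prop := ∀ (n : Int), Dom_gen_init_ulams_py n → Pre_gen_init_ulams_py n → Spec_gen_init_ulams_py n (gen_init_ulams_py n)

-- ===== LEMMAS AND PROOFS =====

-- number of representations of s as u + v with u,v ∈ seq, v < u (counted at the larger element u)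
def pc (seq : List Int) (s : Int) : Nat :=
  seq.countP (fun u => decide (s - u < u) && decide ((s - u) ∈ seq))

theorem aScan_eq (seq : List Int) (uset : Std.TreeSet Int)
    (hset : ∀ x, uset.contains x = true ↔ x ∈ seq) (i : Int) :
    ∀ (r : List Int) (cnt : Int), r.Pairwise (· > ·) → 0 ≤ cnt → cnt ≤ 1 →
    aScan uset i r cnt =
      min (cnt + (r.countP (fun u => decide (i - u < u) && decide ((i - u) ∈ seq)) : Int)) 2 := by
  intro r
  induction r with
  | nil => intro cnt _ h0 h1; simp [aScan]; omega
  | cons u rest ih =>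
    intro cnt hp h0 h1
    rw [List.pairwise_cons] at hp
    obtain ⟨hu, hrest⟩ := hp
    have hcnt : (rest.countP (fun u => decide (i - u < u) && decide ((i - u) ∈ seq)) : Int) ≥ 0 := by positivity
    by_cases hb : i - u ≥ u
    · have hzero : rest.countP (fun v => decide (i - v < v) && decide ((i - v) ∈ seq)) = 0 := by
        rw [List.countP_eq_zero]
        intro v hv
        have : u > v := hu v hv
        simp only [Bool.and_eq_true, decide_eq_true_eq]
        intro hcontra
        omega
      have hut : ¬ (i - u < u) := by omega
      simp only [aScan, if_pos hb, List.countP_cons, hzero, hut, decide_false, Bool.false_and,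
        if_neg (by simp : ¬ ((false : Bool) = true))]
      omega
    · have hb' : i - u < u := by omega
      by_cases hc : uset.contains (i - u) = true
      · have hmem : (i - u) ∈ seq := (hset _).mp hc
        by_cases h2 : cnt + 1 > 1
        · have hcnt1 : cnt = 1 := by omega
          simp only [aScan, if_neg hb, if_pos hc, if_pos h2, List.countP_cons, hb', hmem,
            decide_true, Bool.and_self, if_true]
          omega
        · have hcnt0 : cnt = 0 := by omega
          simp only [aScan, if_neg hb, if_pos hc, if_neg h2, List.countP_cons, hb', hmem,
            decide_true, Bool.and_self, if_true]
          rw [ih (cnt + 1) hrest (by omega) (by omega)]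
          omega
      · have hmem : (i - u) ∉ seq := fun hm => hc ((hset _).mpr hm)
        simp only [aScan, if_neg hb, if_neg hc, List.countP_cons, hmem, decide_false,
          Bool.and_false, if_neg (by simp : ¬ ((false : Bool) = true))]
        rw [ih cnt hrest h0 h1]
        omega

theorem pc_append (seq : List Int) (i : Int)
    (hlt : ∀ u ∈ seq, u < i) (s : Int) :
    pc (seq ++ [i]) s = pc seq s + (if s - i ∈ seq then 1 else 0) := by
  unfold pc
  rw [List.countP_append]
  congr 1
  · apply List.countP_congr
    intro u hu
    by_cases h1 : s - u < u
    · have hne : s - u ≠ i := by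
        intro h
        have := hlt u hu
        omega
      simp [List.mem_append, h1, hne]
    · simp [h1]
  · by_cases hm : s - i ∈ seq
    · have h1 : s - i < i := hlt _ hm
      simp [List.mem_append, h1, hm]
    · simp only [List.countP_cons, List.countP_nil, List.mem_append, List.mem_cons,
        List.not_mem_nil, or_false, if_neg hm, Nat.zero_add]
      by_cases h1 : s - i < i
      · have h2 : s - i ≠ i := by omega
        simp [h1, h2, hm]
      · simp [h1]

theorem getD_eq_one_iff (d : Std.TreeMap Int Int) (k : Int) :
    d.getD k 0 = 1 ↔ d.get? k = some 1 := by
  rw [Std.TreeMap.getD_eq_getD_getElem?, Std.TreeMap.get?_eq_getElem?]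
  cases h : d[k]? <;> simp

theorem land_one_iff (i : Int) (h : 2 < i) : Int.land i 1 = 0 ↔ PySem.Int.mod i 2 = 0 := by
  obtain ⟨m, rfl⟩ := Int.eq_ofNat_of_zero_le (by omega : (0:Int) ≤ i)
  have h1 : Int.land (m : Int) 1 = ((m &&& 1 : Nat) : Int) := rfl
  rw [h1, Nat.and_one_is_mod]
  simp [PySem.Int.mod, Int.fmod_eq_emod]

theorem getD_insert' (d : Std.TreeMap Int Int) (k k' v : Int) :
    (d.insert k v).getD k' 0 = if k' = k then v else d.getD k' 0 := by
  rw [Std.TreeMap.getD_insert]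
  split_ifs <;> simp_all

theorem count_fold : ∀ (seq : List Int) (count : Std.TreeMap Int Int) (i s : Int),
    (seq.foldl (fun d t => d.insert (t + i) (d.getD (t + i) 0 + 1)) count).getD s 0 =
      count.getD s 0 + (seq.countP (fun t => decide (t + i = s)) : Int) := by
  intro seq
  induction seq with
  | nil => intro count i s; simp
  | cons t rest ih =>
    intro count i s
    rw [List.foldl_cons, ih, List.countP_cons]
    by_cases h : t + i = s
    · subst h
      rw [getD_insert' count (t + i) (t + i) _]
      simp
      omega
    · rw [getD_insert' count (t + i) s _, if_neg (fun hh => h hh.symm)]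
      simp [h]

theorem countP_shift (seq : List Int) (i s : Int) (hnd : seq.Nodup) :
    (seq.countP (fun t => decide (t + i = s)) : Int) = (if s - i ∈ seq then 1 else 0) := by
  have h1 : seq.countP (fun t => decide (t + i = s)) = seq.count (s - i) := by
    rw [List.count]
    apply List.countP_congr
    intro t _
    simp only [decide_eq_true_eq, beq_iff_eq]
    constructor <;> intro hh <;> omega
  rw [h1]
  by_cases hm : s - i ∈ seq
  · rw [List.count_eq_one_of_mem hnd hm]; simp [hm]
  · rw [List.count_eq_zero_of_not_mem hm]; simp [hm]

theorem loop_eq : ∀ (fuel : Nat) (uset : Std.TreeSet Int) (seq : List Int)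
    (count : Std.TreeMap Int Int) (i : Int),
    seq.Pairwise (· < ·) → (∀ u ∈ seq, u < i) →
    (∀ x, uset.contains x = true ↔ x ∈ seq) →
    (∀ s, count.getD s 0 = (pc seq s : Int)) →
    aLoop fuel uset seq i = bLoop fuel count seq i := by
  intro fuel
  induction fuel with
  | zero => intro uset seq count i _ _ _ _; rfl
  | succ f ih =>
    intro uset seq count i hsort hlt huset hcount
    have hnd : seq.Nodup := hsort.nodup
    have hrev : seq.reverse.Pairwise (· > ·) := by
      rw [List.pairwise_reverse]; exact hsort
    have hscan : aScan uset i seq.reverse 0 = min ((pc seq i : Int)) 2 := by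
      rw [aScan_eq seq uset huset i seq.reverse 0 hrev (by omega) (by omega), List.countP_reverse]
      unfold pc
      simp
    have hdec : (aScan uset i seq.reverse 0 = 1) ↔ (count.get? i = some 1) := by
      rw [hscan, ← getD_eq_one_iff, hcount i]
      constructor <;> intro h <;> omega
    have hterm : (2 < i ∧ Int.land i 1 = 0) ↔ (2 < i ∧ PySem.Int.mod i 2 = 0) := by
      constructor <;> rintro ⟨h2, h3⟩ <;> exact ⟨h2, by rw [land_one_iff i h2] at *; assumption⟩
    rw [show aLoop (f + 1) uset seq i =
      (if aScan uset i seq.reverse 0 = 1 then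
        (if 2 < i ∧ Int.land i 1 = 0 then seq ++ [i]
         else aLoop f (uset.insert i) (seq ++ [i]) (i + 1))
       else aLoop f uset seq (i + 1)) from rfl]
    rw [show bLoop (f + 1) count seq i =
      (if count.get? i = some 1 then
        (if 2 < i ∧ PySem.Int.mod i 2 = 0 then seq ++ [i]
         else bLoop f
           (seq.foldl (fun d t => d.insert (t + i) (d.getD (t + i) 0 + 1)) count)
           (seq ++ [i]) (i + 1))
       else bLoop f count seq (i + 1)) from rfl]
    by_cases hacc : aScan uset i seq.reverse 0 = 1
    · rw [if_pos hacc, if_pos (hdec.mp hacc)]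
      by_cases ht : 2 < i ∧ Int.land i 1 = 0
      · rw [if_pos ht, if_pos (hterm.mp ht)]
      · rw [if_neg ht, if_neg (fun h => ht (hterm.mpr h))]
        apply ih
        · rw [List.pairwise_append]
          exact ⟨hsort, List.pairwise_singleton _ _, fun a ha b hb => by
            simp at hb; subst hb; exact hlt a ha⟩
        · intro u hu
          rcases List.mem_append.mp hu with h | h
          · exact lt_trans (hlt u h) (by omega)
          · simp at h; omega
        · intro x
          rw [Std.TreeSet.contains_insert]
          simp only [List.mem_append, List.mem_cons, List.not_mem_nil, or_false,
            Bool.or_eq_true, beq_iff_eq, huset x, Int.compare_eq_eq]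
          constructor
          · rintro (rfl | h)
            · exact Or.inr rfl
            · exact Or.inl h
          · rintro (h | rfl)
            · exact Or.inr h
            · exact Or.inl rfl
        · intro s
          rw [count_fold seq count i s, countP_shift seq i s hnd, hcount s,
            pc_append seq i hlt s]
          push_cast
          split_ifs <;> simp
    · rw [if_neg hacc, if_neg (fun h => hacc (hdec.mpr h))]
      apply ih uset seq count (i + 1) hsort
      · intro u hu; exact lt_trans (hlt u hu) (by omega)
      · exact huset
      · exact hcount

theorem pc_init (b s : Int) (hb : 2 < b) :
    (((∅ : Std.TreeMap Int Int).insert (2 + b) 1).getD s 0) = ((pc [2, b] s : Int)) := by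
  rw [getD_insert']
  unfold pc
  simp only [List.countP_cons, List.countP_nil, List.mem_cons, List.not_mem_nil, or_false,
    Nat.zero_add]
  by_cases h : s = 2 + b
  · subst h
    have e3 : 2 + b - b = 2 := by ring
    simp [e3]
    split_ifs <;> omega
  · rw [if_neg h]
    have r2 : ¬ (s - b < b ∧ (s - b = 2 ∨ s - b = b)) := by
      rintro ⟨h1, h2 | h2⟩ <;> omega
    simp [r2]
    omega

-- ===== VERDICT (by name: the statement is the Claim_ definition above) =====
theorem gen_init_ulams_py_spec : Claim_equal_gen_init_ulams_py := by
  intro n _ hpre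
  unfold Pre_gen_init_ulams_py at hpre
  unfold Spec_gen_init_ulams_py gen_init_ulams_py gen_init_ulams_py_alt
  have hb : 2 < n * 2 + 1 := by omega
  simp only []
  apply loop_eq
  · simp [List.pairwise_cons]
    omega
  · intro u hu
    simp at hu
    rcases hu with h | h <;> omega
  · intro x
    rw [Std.TreeSet.contains_insert, Std.TreeSet.contains_insert]
    have hemp : (∅ : Std.TreeSet Int).contains x = false := by
      simp
    simp only [hemp, Bool.or_false, Bool.or_eq_true, beq_iff_eq,
      List.mem_cons, List.not_mem_nil, or_false, Int.compare_eq_eq]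
    constructor
    · rintro (rfl | rfl) <;> simp
    · rintro (rfl | rfl) <;> simp
  · intro s
    exact pc_init (n * 2 + 1) s hb
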